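-- pv_equiv track=rewrite | github.com/zoe1101/CodeTest | python基础/文件操作/har2api.py | list2dic
-- ===== SOURCE A (Python) =====
-- def list2dic(headers):
--     header_dic = dict()
--     for head in headers:
--         if head['name'] in header_dic:
--             header_dic[head['name']] = header_dic[head['name']] + ',' + head['value']
--         else:
--             header_dic[head['name']] = head['value']
--     return header_dic
-- ===== SOURCE B (Python) =====
-- def list2dic(headers):
--     groups = {}
--     for head in headers:
--         name = head['name']
--         groups[name] = groups.get(name, []) + [head['value']]
--     return {name: ','.join(vals) for name, vals in groups.items()}
-- ===== Notes on version B (the rewrite author's own statement) =====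
-- stated objective: alternative
-- what changed: B groups all values per header name in one pass and then comma-joins each group once, instead of A's repeated string re-concatenation on every duplicate.
import Mathlib
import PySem

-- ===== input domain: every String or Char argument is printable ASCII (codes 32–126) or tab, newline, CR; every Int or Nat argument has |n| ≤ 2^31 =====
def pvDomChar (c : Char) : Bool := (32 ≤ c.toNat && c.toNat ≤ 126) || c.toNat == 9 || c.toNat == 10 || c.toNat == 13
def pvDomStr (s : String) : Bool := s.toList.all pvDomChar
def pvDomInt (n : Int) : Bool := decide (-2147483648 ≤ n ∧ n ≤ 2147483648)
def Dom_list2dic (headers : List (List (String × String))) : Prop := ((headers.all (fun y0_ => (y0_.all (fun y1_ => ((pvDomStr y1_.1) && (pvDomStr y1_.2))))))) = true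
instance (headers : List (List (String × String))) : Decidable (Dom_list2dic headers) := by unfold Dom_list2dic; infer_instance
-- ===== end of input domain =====

-- B builds per-name value lists in one pass and comma-joins each group once, instead of
-- A's repeated string re-concatenation on every duplicate name; same return value.


-- ===== PORT A =====
-- One fold over headers; on a missing 'name'/'value' key the Python raises KeyError
-- (those inputs are excluded by Pre_list2dic; the port leaves the dict unchanged there).
def list2dic (headers : List (List (String × String))) : List (String × String) :=
  (headers.foldl
    (fun d head =>
      match (PySem.Dict.mk head).get? "name" with
      | none => d
      | some n =>
        match (PySem.Dict.mk head).get? "value" with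
        | none => d
        | some v =>
          match d.get? n with
          | some old => d.insert n (old ++ "," ++ v)
          | none => d.insert n v)
    (PySem.Dict.empty : PySem.Dict String String)).items

-- ===== PORT B =====
-- First pass: group values by name (groups[name] = groups.get(name, []) + [value]);
-- second pass: comma-join each group.
def list2dic_alt (headers : List (List (String × String))) : List (String × String) :=
  (headers.foldl
    (fun g head =>
      match (PySem.Dict.mk head).get? "name", (PySem.Dict.mk head).get? "value" with
      | some n, some v => g.modify n [] (fun vs => vs ++ [v])
      | _, _ => g)
    (PySem.Dict.empty : PySem.Dict String (List String))).items.map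
    (fun p => (p.1, PySem.Str.join "," p.2))

-- ===== PRECONDITION & SPEC =====
-- Pre_ excludes exactly the inputs where A raises KeyError: a header without a 'name' or 'value' key.
def Pre_list2dic (headers : List (List (String × String))) : Prop :=
  (headers.all (fun h => h.any (fun p => p.1 == "name") && h.any (fun p => p.1 == "value"))) = true
instance (headers : List (List (String × String))) : Decidable (Pre_list2dic headers) := by unfold Pre_list2dic; infer_instance
def pvWitness_list2dic : (List (List (String × String))) :=
  [[("name", "Host"), ("value", "a.example")], [("name", "Host"), ("value", "b.example")]]
def Spec_list2dic (headers : List (List (String × String))) (out : List (String × String)) : Prop := out = list2dic_alt headers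
instance (headers : List (List (String × String))) (out : List (String × String)) : Decidable (Spec_list2dic headers out) := by unfold Spec_list2dic; infer_instance

-- ===== CLAIM (what is proved, stated in full; the proofs are below) =====
def Claim_equal_list2dic : Prop := ∀ (headers : List (List (String × String))), Dom_list2dic headers → Pre_list2dic headers → Spec_list2dic headers (list2dic headers)

-- ===== LEMMAS AND PROOFS =====

lemma chars_join_cons_append (sep c a : List Char) (t : List (List Char)) :
    PySem.Chars.join sep (a :: (t ++ [c])) = PySem.Chars.join sep (a :: t) ++ sep ++ c := by
  induction t generalizing a with
  | nil =>
    rw [List.nil_append, PySem.Chars.join_cons_cons]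
    simp [PySem.Chars.join_singleton]
  | cons b t' ih =>
    rw [List.cons_append, PySem.Chars.join_cons_cons, ih b, PySem.Chars.join_cons_cons]
    simp

lemma join_append_singleton (vs : List String) (v : String) (h : vs ≠ []) :
    PySem.Str.join "," (vs ++ [v]) = PySem.Str.join "," vs ++ "," ++ v := by
  apply String.toList_injective
  obtain ⟨a, t, rfl⟩ := List.exists_cons_of_ne_nil h
  simp only [PySem.Str.join, List.map_append, List.map_cons, List.map_nil, List.cons_append]
  rw [chars_join_cons_append]
  simp

lemma join_single (v : String) : PySem.Str.join "," [v] = v := by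
  apply String.toList_injective
  simp [PySem.Str.join, PySem.Chars.join_singleton]

-- the per-pair post-processing B applies to the grouped dict
def joinPair (p : String × List String) : String × String := (p.1, PySem.Str.join "," p.2)

lemma keys_eq_of_items_map (d1 : PySem.Dict String String) (d2 : PySem.Dict String (List String))
    (h : d1.items = d2.items.map joinPair) : d1.keys = d2.keys := by
  simp only [PySem.Dict.keys, h, List.map_map]
  rfl

-- loop invariant: A's dict is pointwise the comma-join of B's grouping dict
lemma fold_invariant (headers : List (List (String × String)))
    (d1 : PySem.Dict String String) (d2 : PySem.Dict String (List String))
    (hitems : d1.items = d2.items.map joinPair)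
    (hnd : d2.keys.Nodup)
    (hne : ∀ p ∈ d2.items, p.2 ≠ []) :
    (headers.foldl
      (fun d head =>
        match (PySem.Dict.mk head).get? "name" with
        | none => d
        | some n =>
          match (PySem.Dict.mk head).get? "value" with
          | none => d
          | some v =>
            match d.get? n with
            | some old => d.insert n (old ++ "," ++ v)
            | none => d.insert n v) d1).items
    = ((headers.foldl
      (fun g head =>
        match (PySem.Dict.mk head).get? "name", (PySem.Dict.mk head).get? "value" with
        | some n, some v => g.modify n [] (fun vs => vs ++ [v])
        | _, _ => g) d2).items).map joinPair := by
  induction headers generalizing d1 d2 with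
  | nil => simpa using hitems
  | cons head rest ih =>
    simp only [List.foldl_cons]
    cases hn : (PySem.Dict.mk head).get? "name" with
    | none => exact ih d1 d2 hitems hnd hne
    | some n =>
      cases hv : (PySem.Dict.mk head).get? "value" with
      | none => exact ih d1 d2 hitems hnd hne
      | some v =>
        simp only []
        have hkeys : d1.keys = d2.keys := keys_eq_of_items_map d1 d2 hitems
        have hnd1 : d1.keys.Nodup := hkeys ▸ hnd
        cases hg : d2.get? n with
        | none =>
          -- fresh key on both sides
          have hc2 : d2.contains n = false := by
            rw [PySem.Dict.contains_eq_isSome_get?, hg]; rfl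
          have hc1 : d1.contains n = false := by
            rw [PySem.Dict.contains_eq_decide_mem_keys, hkeys,
                ← PySem.Dict.contains_eq_decide_mem_keys, hc2]
          have h1 : d1.get? n = none := by
            rw [PySem.Dict.get?_eq_none_iff_contains]; exact hc1
          rw [h1]
          have hmod : d2.modify n [] (fun vs => vs ++ [v]) = d2.insert n [v] := by
            simp [PySem.Dict.modify, PySem.Dict.getD_of_not_contains d2 [] hc2]
          rw [hmod]
          apply ih
          · rw [PySem.Dict.items_insert_of_not_contains d1 v hc1,
                PySem.Dict.items_insert_of_not_contains d2 [v] hc2]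
            simp [hitems, joinPair, join_single]
          · rw [PySem.Dict.keys_insert_of_not_contains d2 [v] hc2]
            refine List.Nodup.append hnd (List.nodup_singleton n) ?_
            intro x hx hx'
            have : x = n := by simpa using hx'
            subst this
            have : d2.contains x = true := by
              rw [PySem.Dict.contains_eq_decide_mem_keys]; simpa using hx
            rw [hc2] at this; exact absurd this (by simp)
          · intro p hp
            rcases (PySem.Dict.mem_items_insert _ _ _ _).1 hp with h | h
            · subst h; simp
            · exact hne p h.1
        | some vs =>
          -- existing key on both sides
          have hvs : vs ≠ [] := hne (n, vs) (PySem.Dict.mem_items_of_get?_eq_some d2 hg)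
          have hc2 : d2.contains n = true := by
            rw [PySem.Dict.contains_eq_isSome_get?, hg]; rfl
          have hc1 : d1.contains n = true := by
            rw [PySem.Dict.contains_eq_decide_mem_keys, hkeys,
                ← PySem.Dict.contains_eq_decide_mem_keys, hc2]
          have hmem2 : (n, vs) ∈ d2.items := PySem.Dict.mem_items_of_get?_eq_some d2 hg
          have hmem1 : (n, PySem.Str.join "," vs) ∈ d1.items := by
            rw [hitems]; exact List.mem_map.2 ⟨(n, vs), hmem2, rfl⟩
          have h1 : d1.get? n = some (PySem.Str.join "," vs) :=
            PySem.Dict.get?_of_mem_items d1 hmem1 hnd1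
          rw [h1]
          have hmod : d2.modify n [] (fun vs' => vs' ++ [v]) = d2.insert n (vs ++ [v]) := by
            simp [PySem.Dict.modify, PySem.Dict.getD_eq_get?_getD, hg]
          rw [hmod]
          apply ih
          · rw [PySem.Dict.items_insert_of_contains d1 _ hc1,
                PySem.Dict.items_insert_of_contains d2 _ hc2, hitems,
                List.map_map, List.map_map]
            apply List.map_congr_left
            intro p _
            by_cases hpn : p.1 = n
            · simp [Function.comp, joinPair, hpn, join_append_singleton vs v hvs]
            · simp [Function.comp, joinPair, hpn]
          · rw [PySem.Dict.keys_insert_of_contains d2 (vs ++ [v]) hc2]; exact hnd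
          · intro p hp
            rcases (PySem.Dict.mem_items_insert _ _ _ _).1 hp with h | h
            · subst h; simp
            · exact hne p h.1

-- ===== VERDICT (by name: the statement is the Claim_ definition above) =====
theorem list2dic_spec : Claim_equal_list2dic := by
  intro headers _ _
  unfold Spec_list2dic list2dic list2dic_alt
  exact fold_invariant headers PySem.Dict.empty PySem.Dict.empty rfl (by simp) (by intro p hp; simp [PySem.Dict.empty] at hp)
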